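-- pv_equiv track=rewrite | github.com/ayushdnb/Neural-Abyss | lineage_tree.py | assign_y
-- ===== SOURCE A (Python) =====
-- def assign_y(children, roots, keep):
--     y = {}
--     cur = 0
--     stack = []
--     for r in roots:
--         if r in keep:
--             stack.append(r)
--             while stack:
--                 n = stack.pop()
--                 if n in y:
--                     continue
--                 y[n] = cur
--                 cur += 1
--                 # push children reverse for stable ordering
--                 cs = [c for c in children.get(n, []) if c in keep]
--                 for c in reversed(cs):
--                     stack.append(c)
--     return y
-- ===== SOURCE B (Python) =====
-- def assign_y(children, roots, keep):
--     # recursive DFS that only records the visiting ORDER; the y-dict is built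
--     # afterwards in one enumerate pass
--     keep_set = set(keep)
--     seen = set()
--     order = []
--
--     def visit(n):
--         if n in seen:
--             return
--         seen.add(n)
--         order.append(n)
--         for c in children.get(n, []):
--             if c in keep_set:
--                 visit(c)
--
--     for r in roots:
--         if r in keep_set:
--             visit(r)
--     return {n: i for i, n in enumerate(order)}
-- ===== Notes on version B (the rewrite author's own statement) =====
-- stated objective: simpler
-- what changed: A is an iterative DFS over an explicit node stack that interleaves numbering with traversal (children pushed reversed, visited check deferred to pop time); B is a recursive DFS that only collects the preorder visiting list, and the y-mapping is produced afterwards by a single enumerate pass.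
import Mathlib
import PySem

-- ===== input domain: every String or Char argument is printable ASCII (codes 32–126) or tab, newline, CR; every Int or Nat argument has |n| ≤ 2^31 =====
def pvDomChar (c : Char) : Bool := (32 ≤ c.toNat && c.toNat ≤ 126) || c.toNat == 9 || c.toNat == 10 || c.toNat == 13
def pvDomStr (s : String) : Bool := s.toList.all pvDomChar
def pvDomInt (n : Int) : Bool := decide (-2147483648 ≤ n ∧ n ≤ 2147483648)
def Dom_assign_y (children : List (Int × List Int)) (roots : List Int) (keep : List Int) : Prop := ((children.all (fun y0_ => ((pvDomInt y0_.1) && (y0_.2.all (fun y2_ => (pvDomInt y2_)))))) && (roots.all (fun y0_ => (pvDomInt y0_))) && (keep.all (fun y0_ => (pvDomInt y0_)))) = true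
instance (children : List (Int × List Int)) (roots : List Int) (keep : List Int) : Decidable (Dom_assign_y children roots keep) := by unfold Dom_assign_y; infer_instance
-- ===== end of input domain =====

-- B replaces A's explicit node stack (numbering interleaved with the traversal) by a
-- recursive DFS that only collects the preorder visiting list, building the y-dict
-- afterwards in one enumerate pass; objective: simpler (same asymptotic cost; on very
-- deep trees the recursive Python B may hit the interpreter recursion limit where A returns).

-- number of keys of `ks` not yet present in the dict `y` (termination measure for A's loop)
def pvU (ks : List Int) (y : PySem.Dict Int Int) : Nat :=
  (ks.filter (fun k => !(y.contains k))).length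

theorem pvU_insert_lt (ks : List Int) (y : PySem.Dict Int Int) (n v : Int)
    (hk : n ∈ ks) (hn : y.contains n = false) :
    pvU ks (y.insert n v) < pvU ks y := by
  unfold pvU
  have h : ∀ k : Int, (!((y.insert n v).contains k)) = ((!(k == n)) && !(y.contains k)) := by
    intro k
    rw [PySem.Dict.contains_insert]
    cases hk : k == n <;> cases hc : y.contains k <;> simp
  simp only [h, ← List.filter_filter]
  apply List.length_filter_lt_length_iff_exists.2
  refine ⟨n, List.mem_filter.2 ⟨hk, by simp [hn]⟩, by simp⟩

-- number of keys of `ks` not yet in the set `seen` (termination measure for B's recursion)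
def pvUS (ks : List Int) (seen : PySem.Set Int) : Nat :=
  (ks.filter (fun k => !(PySem.Set.contains seen k))).length

theorem pv_contains_decide (s : PySem.Set Int) (k : Int) :
    PySem.Set.contains s k = decide (k ∈ s) := by
  by_cases h : k ∈ s
  · simp [h]
  · simp only [h, decide_false]
    exact Bool.eq_false_iff.2 (fun hc => h ((PySem.Set.contains_iff s k).1 hc))

theorem pv_contains_add (s : PySem.Set Int) (x k : Int) :
    PySem.Set.contains (PySem.Set.add s x) k = (k == x || PySem.Set.contains s k) := by
  rw [pv_contains_decide, pv_contains_decide]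
  by_cases hk : k = x <;> by_cases hks : k ∈ s <;>
    simp [PySem.Set.mem_add, hk, hks]

theorem pvUS_add_lt (ks : List Int) (seen : PySem.Set Int) (n : Int)
    (hk : n ∈ ks) (hn : PySem.Set.contains seen n = false) :
    pvUS ks (PySem.Set.add seen n) < pvUS ks seen := by
  unfold pvUS
  have h : ∀ k : Int,
      (!(PySem.Set.contains (PySem.Set.add seen n) k)) =
        ((!(k == n)) && !(PySem.Set.contains seen k)) := by
    intro k
    rw [pv_contains_add]
    cases hk : k == n <;> cases hc : PySem.Set.contains seen k <;> simp
  simp only [h, ← List.filter_filter]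
  apply List.length_filter_lt_length_iff_exists.2
  refine ⟨n, List.mem_filter.2 ⟨hk, by rw [hn]; rfl⟩, by simp⟩

-- ===== PORT A =====
-- A: explicit node stack; pop, skip if already numbered, else number it and push its
-- kept children in reverse (stack top = list head).
def pvLoopA (cd : PySem.Dict Int (List Int)) (keep : List Int) :
    (stack : List Int) → (∀ x ∈ stack, keep.contains x = true) →
    PySem.Dict Int Int → Int → PySem.Dict Int Int × Int
  | [], _, y, cur => (y, cur)
  | n :: rest, h, y, cur =>
    if hv : y.contains n = true then
      pvLoopA cd keep rest (fun x hx => h x (List.mem_cons_of_mem _ hx)) y cur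
    else
      -- cs = [c for c in children.get(n, []) if c in keep]; pushing reversed(cs) one by
      -- one onto a top-at-head stack leaves the stack as cs ++ rest
      pvLoopA cd keep (((cd.getD n []).filter (fun c => keep.contains c)) ++ rest)
        (by
          intro x hx
          rcases List.mem_append.1 hx with hx | hx
          · exact List.of_mem_filter hx
          · exact h x (List.mem_cons_of_mem _ hx))
        (y.insert n cur) (cur + 1)
  termination_by stack _ y _ => (pvU keep y, stack.length)
  decreasing_by
  · exact Prod.Lex.right _ (Nat.lt_succ_self _)
  · exact Prod.Lex.left _ _
      (pvU_insert_lt keep y n cur (List.mem_of_elem_eq_true (h n (List.mem_cons_self)))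
        (Bool.eq_false_iff.2 hv))

def assign_y (children : List (Int × List Int)) (roots : List Int) (keep : List Int) :
    List (Int × Int) :=
  let cd : PySem.Dict Int (List Int) := PySem.Dict.mk children
  (roots.foldl
    (fun s r =>
      if hr : keep.contains r = true then
        pvLoopA cd keep [r] (by intro x hx; simp only [List.mem_singleton] at hx; subst hx; exact hr)
          s.1 s.2
      else s)
    (PySem.Dict.empty, 0)).1.items

-- ===== PORT B =====
-- B: recursive visit(n) over `children.get(n, [])`; `visit`'s early `n in seen` return is
-- inlined at its two call sites (the guard of the recursive call) so that the structural
-- recursion carries the strictly-decreasing unseen count; state = (seen set, order list).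
def pvVisitB (cd : PySem.Dict Int (List Int)) (kset : PySem.Set Int) :
    (cs : List Int) → (seen : PySem.Set Int) → (order : List Int) →
    {p : PySem.Set Int × List Int // pvUS kset p.1 ≤ pvUS kset seen}
  | [], seen, order => ⟨(seen, order), le_refl _⟩
  | c :: cs, seen, order =>
    if h : PySem.Set.contains kset c = true ∧ PySem.Set.contains seen c = false then
      -- visit(c): seen.add(c); order.append(c); then recurse over c's children
      let s1 := pvVisitB cd kset (cd.getD c []) (PySem.Set.add seen c) (order ++ [c])
      let s2 := pvVisitB cd kset cs s1.val.1 s1.val.2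
      ⟨s2.val, le_trans s2.property (le_trans s1.property
        (le_of_lt (pvUS_add_lt kset seen c ((PySem.Set.contains_iff _ _).1 h.1) h.2)))⟩
    else
      pvVisitB cd kset cs seen order
  termination_by cs seen _ => (pvUS kset seen, cs.length)
  decreasing_by
  · exact Prod.Lex.left _ _
      (pvUS_add_lt kset seen c ((PySem.Set.contains_iff _ _).1 h.1) h.2)
  · exact Prod.Lex.left _ _
      (lt_of_le_of_lt s1.property
        (pvUS_add_lt kset seen c ((PySem.Set.contains_iff _ _).1 h.1) h.2))
  · exact Prod.Lex.right _ (Nat.lt_succ_self _)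

def assign_y_alt (children : List (Int × List Int)) (roots : List Int) (keep : List Int) :
    List (Int × Int) :=
  let cd : PySem.Dict Int (List Int) := PySem.Dict.mk children
  let kset : PySem.Set Int := PySem.Set.ofList keep
  let st := roots.foldl
    (fun (st : PySem.Set Int × List Int) r =>
      if PySem.Set.contains kset r && !(PySem.Set.contains st.1 r) then
        (pvVisitB cd kset (cd.getD r []) (PySem.Set.add st.1 r) (st.2 ++ [r])).val
      else st)
    (PySem.Set.empty, [])
  -- {n: i for i, n in enumerate(order)}
  ((PySem.List.enumerate st.2 0).foldl (fun d p => d.insert p.2 p.1)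
    (PySem.Dict.empty : PySem.Dict Int Int)).items

-- ===== PRECONDITION & SPEC =====
def Spec_assign_y (children : List (Int × List Int)) (roots : List Int) (keep : List Int) (out : List (Int × Int)) : Prop := out = assign_y_alt children roots keep
instance (children : List (Int × List Int)) (roots : List Int) (keep : List Int) (out : List (Int × Int)) : Decidable (Spec_assign_y children roots keep out) := by unfold Spec_assign_y; infer_instance

-- ===== CLAIM (what is proved, stated in full; the proofs are below) =====
def Claim_equal_assign_y : Prop := ∀ (children : List (Int × List Int)) (roots : List Int) (keep : List Int), Dom_assign_y children roots keep → Spec_assign_y children roots keep (assign_y children roots keep)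

-- ===== LEMMAS AND PROOFS =====

-- the dict B builds from the order list: {n: i for i, n in enumerate(order)}
def pvED (order : List Int) : PySem.Dict Int Int :=
  (PySem.List.enumerate order 0).foldl (fun d p => d.insert p.2 p.1)
    (PySem.Dict.empty : PySem.Dict Int Int)

theorem pvED_snoc (order : List Int) (c : Int) :
    pvED (order ++ [c]) = (pvED order).insert c (order.length : Int) := by
  unfold pvED
  rw [PySem.List.enumerate_append, List.foldl_append]
  simp [PySem.List.enumerate_cons, PySem.List.enumerate_nil]

-- A-side abstraction of one visit: recursive DFS over one child list on state (y, cur)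
def pvVisitKids (cd : PySem.Dict Int (List Int)) (kset : PySem.Set Int) :
    (cs : List Int) → (y : PySem.Dict Int Int) → (cur : Int) →
    {s : PySem.Dict Int Int × Int // pvU kset s.1 ≤ pvU kset y}
  | [], y, _cur => ⟨(y, _cur), le_refl _⟩
  | c :: cs, y, cur =>
    if h : PySem.Set.contains kset c = true ∧ y.contains c = false then
      let s1 := pvVisitKids cd kset (cd.getD c []) (y.insert c cur) (cur + 1)
      let s2 := pvVisitKids cd kset cs s1.val.1 s1.val.2
      ⟨s2.val, le_trans s2.property (le_trans s1.property
        (le_of_lt (pvU_insert_lt kset y c cur (List.mem_of_elem_eq_true h.1) h.2)))⟩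
    else
      pvVisitKids cd kset cs y cur
  termination_by cs y _ => (pvU kset y, cs.length)
  decreasing_by
  · exact Prod.Lex.left _ _
      (pvU_insert_lt kset y c cur (List.mem_of_elem_eq_true h.1) h.2)
  · exact Prod.Lex.left _ _
      (lt_of_le_of_lt s1.property
        (pvU_insert_lt kset y c cur (List.mem_of_elem_eq_true h.1) h.2))
  · exact Prod.Lex.right _ (Nat.lt_succ_self _)

-- one visit step (A's treatment of one popped node)
def pvVisitOne (cd : PySem.Dict Int (List Int)) (kset : PySem.Set Int)
    (n : Int) (s : PySem.Dict Int Int × Int) : PySem.Dict Int Int × Int :=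
  if s.1.contains n = true then s
  else (pvVisitKids cd kset (cd.getD n []) (s.1.insert n s.2) (s.2 + 1)).val

def pvVseq (cd : PySem.Dict Int (List Int)) (kset : PySem.Set Int)
    (l : List Int) (s : PySem.Dict Int Int × Int) : PySem.Dict Int Int × Int :=
  l.foldl (fun s n => pvVisitOne cd kset n s) s

theorem pv_contains_ofList (keep : List Int) (x : Int) :
    PySem.Set.contains (PySem.Set.ofList keep) x = keep.contains x := by
  by_cases hm : x ∈ keep <;>
    simp [PySem.Set.contains_eq_listContains, PySem.Set.mem_ofList, hm]

theorem pvLK (cd : PySem.Dict Int (List Int)) (keep : List Int) :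
    ∀ u0 (y : PySem.Dict Int Int), pvU (PySem.Set.ofList keep) y ≤ u0 →
    ∀ (l : List Int) (cur : Int),
      pvVseq cd (PySem.Set.ofList keep) (l.filter (fun c => keep.contains c)) (y, cur) =
        (pvVisitKids cd (PySem.Set.ofList keep) l y cur).val := by
  intro u0
  induction u0 using Nat.strong_induction_on with
  | _ u0 ih =>
    intro y hu l
    induction l with
    | nil => intro cur; rw [pvVisitKids]; rfl
    | cons c l ihl =>
      intro cur
      rw [pvVisitKids]
      by_cases hc : keep.contains c = true
      · by_cases hv : y.contains c = true
        · have hcond : ¬ (PySem.Set.contains (PySem.Set.ofList keep) c = true ∧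
              y.contains c = false) := by
            intro hh; rw [hv] at hh; exact Bool.noConfusion hh.2
          simp only [dif_neg hcond]
          rw [List.filter_cons_of_pos hc]
          have : pvVseq cd (PySem.Set.ofList keep)
              (c :: l.filter (fun c => keep.contains c)) (y, cur) =
              pvVseq cd (PySem.Set.ofList keep) (l.filter (fun c => keep.contains c))
                (pvVisitOne cd (PySem.Set.ofList keep) c (y, cur)) := rfl
          rw [this, pvVisitOne]
          simp only [hv, if_pos]
          exact ihl cur
        · have hvf : y.contains c = false := Bool.eq_false_iff.2 hv
          have hcond : PySem.Set.contains (PySem.Set.ofList keep) c = true ∧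
              y.contains c = false := ⟨by rw [pv_contains_ofList]; exact hc, hvf⟩
          simp only [dif_pos hcond]
          rw [List.filter_cons_of_pos hc]
          have hstep : pvVseq cd (PySem.Set.ofList keep)
              (c :: l.filter (fun c => keep.contains c)) (y, cur) =
              pvVseq cd (PySem.Set.ofList keep) (l.filter (fun c => keep.contains c))
                (pvVisitOne cd (PySem.Set.ofList keep) c (y, cur)) := rfl
          rw [hstep, pvVisitOne]
          simp only [hvf, Bool.false_eq_true, if_neg, not_false_iff]
          have hlt : pvU (PySem.Set.ofList keep) (y.insert c cur) < u0 :=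
            lt_of_lt_of_le
              (pvU_insert_lt _ y c cur
                ((PySem.Set.mem_ofList _ _).2 (List.mem_of_elem_eq_true hc)) hvf) hu
          set s1 := pvVisitKids cd (PySem.Set.ofList keep) (cd.getD c [])
            (y.insert c cur) (cur + 1) with hs1
          have := ih (pvU (PySem.Set.ofList keep) s1.val.1)
            (lt_of_le_of_lt s1.property hlt) s1.val.1 (le_refl _) l s1.val.2
          rw [← this]
      · rw [List.filter_cons_of_neg (by simpa using hc)]
        have hcond : ¬ (PySem.Set.contains (PySem.Set.ofList keep) c = true ∧
            y.contains c = false) := by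
          intro hh
          rw [pv_contains_ofList] at hh
          exact hc hh.1
        simp only [dif_neg hcond]
        exact ihl cur

theorem pvLA (cd : PySem.Dict Int (List Int)) (keep : List Int) :
    ∀ u0 (y : PySem.Dict Int Int), pvU (PySem.Set.ofList keep) y ≤ u0 →
    ∀ (stack : List Int) (h : ∀ x ∈ stack, keep.contains x = true) (cur : Int),
      pvLoopA cd keep stack h y cur =
        pvVseq cd (PySem.Set.ofList keep) stack (y, cur) := by
  intro u0
  induction u0 using Nat.strong_induction_on with
  | _ u0 ih =>
    intro y hu stack
    induction stack with
    | nil => intro h cur; rw [pvLoopA]; rfl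
    | cons n rest ihs =>
      intro h cur
      rw [pvLoopA]
      have hstep : pvVseq cd (PySem.Set.ofList keep) (n :: rest) (y, cur) =
          pvVseq cd (PySem.Set.ofList keep) rest
            (pvVisitOne cd (PySem.Set.ofList keep) n (y, cur)) := rfl
      by_cases hv : y.contains n = true
      · simp only [dif_pos hv]
        rw [hstep, pvVisitOne]
        simp only [hv, if_pos]
        exact ihs _ cur
      · simp only [dif_neg hv]
        have hvf : y.contains n = false := Bool.eq_false_iff.2 hv
        have hklt : pvU (PySem.Set.ofList keep) (y.insert n cur) < u0 :=
          lt_of_lt_of_le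
            (pvU_insert_lt _ y n cur
              ((PySem.Set.mem_ofList _ _).2 (List.mem_of_elem_eq_true (h n List.mem_cons_self)))
              hvf) hu
        rw [ih (pvU (PySem.Set.ofList keep) (y.insert n cur)) hklt (y.insert n cur)
          (le_refl _) _ _ (cur + 1)]
        rw [hstep, pvVisitOne]
        simp only [hvf, Bool.false_eq_true, if_neg, not_false_iff]
        unfold pvVseq
        rw [List.foldl_append]
        congr 1
        have := pvLK cd keep (pvU (PySem.Set.ofList keep) (y.insert n cur)) (y.insert n cur)
          (le_refl _) (cd.getD n []) (cur + 1)
        unfold pvVseq at this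
        rw [this]

-- the simulation relation: A's (y, cur) ↔ B's (seen, order)
def pvRel (y : PySem.Dict Int Int) (cur : Int) (seen : PySem.Set Int) (order : List Int) : Prop :=
  y = pvED order ∧ cur = (order.length : Int) ∧
    ∀ k : Int, y.contains k = PySem.Set.contains seen k

theorem pvRel_step (y : PySem.Dict Int Int) (cur : Int) (seen : PySem.Set Int)
    (order : List Int) (c : Int) (hr : pvRel y cur seen order) :
    pvRel (y.insert c cur) (cur + 1) (PySem.Set.add seen c) (order ++ [c]) := by
  obtain ⟨h1, h2, h3⟩ := hr
  refine ⟨by rw [pvED_snoc, ← h1, ← h2], by simp [h2], ?_⟩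
  intro k
  rw [PySem.Dict.contains_insert, pv_contains_add, h3 k]

-- parallel run of A's abstraction and B's recursion from related states
theorem pvPar (cd : PySem.Dict Int (List Int)) (kset : PySem.Set Int) :
    ∀ u0 (y : PySem.Dict Int Int) (cur : Int) (seen : PySem.Set Int) (order : List Int),
      pvU kset y ≤ u0 → pvRel y cur seen order →
      ∀ cs : List Int,
        pvRel (pvVisitKids cd kset cs y cur).val.1 (pvVisitKids cd kset cs y cur).val.2
          (pvVisitB cd kset cs seen order).val.1 (pvVisitB cd kset cs seen order).val.2 := by
  intro u0
  induction u0 using Nat.strong_induction_on with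
  | _ u0 ih =>
    intro y cur seen order hu hr cs
    induction cs with
    | nil => rw [pvVisitKids, pvVisitB]; exact hr
    | cons c cs ihc =>
      rw [pvVisitKids, pvVisitB]
      have hg : (PySem.Set.contains kset c = true ∧ y.contains c = false) ↔
          (PySem.Set.contains kset c = true ∧ PySem.Set.contains seen c = false) := by
        rw [hr.2.2 c]
      by_cases h : PySem.Set.contains kset c = true ∧ y.contains c = false
      · simp only [dif_pos h, dif_pos (hg.1 h)]
        have hlt : pvU kset (y.insert c cur) < u0 :=
          lt_of_lt_of_le (pvU_insert_lt kset y c cur (List.mem_of_elem_eq_true h.1) h.2) hu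
        have hr1 := pvRel_step y cur seen order c hr
        have h1 := ih (pvU kset (y.insert c cur)) hlt (y.insert c cur) (cur + 1)
          (PySem.Set.add seen c) (order ++ [c]) (le_refl _) hr1 (cd.getD c [])
        set sa := pvVisitKids cd kset (cd.getD c []) (y.insert c cur) (cur + 1) with hsa
        set sb := pvVisitB cd kset (cd.getD c []) (PySem.Set.add seen c) (order ++ [c]) with hsb
        exact ih (pvU kset sa.val.1) (lt_of_le_of_lt sa.property hlt) sa.val.1 sa.val.2
          sb.val.1 sb.val.2 (le_refl _) h1 cs
      · simp only [dif_neg h, dif_neg (fun hh => h (hg.2 hh))]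
        exact ihc

-- the whole fold over roots, run in parallel on both sides
theorem pvTop (cd : PySem.Dict Int (List Int)) (keep : List Int) :
    ∀ (rs : List Int) (y : PySem.Dict Int Int) (cur : Int)
      (seen : PySem.Set Int) (order : List Int), pvRel y cur seen order →
      pvRel
        (rs.foldl (fun s r =>
          if hr : keep.contains r = true then
            pvLoopA cd keep [r]
              (by intro x hx; simp only [List.mem_singleton] at hx; subst hx; exact hr)
              s.1 s.2
          else s) (y, cur)).1
        (rs.foldl (fun s r =>
          if hr : keep.contains r = true then
            pvLoopA cd keep [r]
              (by intro x hx; simp only [List.mem_singleton] at hx; subst hx; exact hr)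
              s.1 s.2
          else s) (y, cur)).2
        (rs.foldl (fun (st : PySem.Set Int × List Int) r =>
          if PySem.Set.contains (PySem.Set.ofList keep) r && !(PySem.Set.contains st.1 r) then
            (pvVisitB cd (PySem.Set.ofList keep) (cd.getD r [])
              (PySem.Set.add st.1 r) (st.2 ++ [r])).val
          else st) (seen, order)).1
        (rs.foldl (fun (st : PySem.Set Int × List Int) r =>
          if PySem.Set.contains (PySem.Set.ofList keep) r && !(PySem.Set.contains st.1 r) then
            (pvVisitB cd (PySem.Set.ofList keep) (cd.getD r [])
              (PySem.Set.add st.1 r) (st.2 ++ [r])).val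
          else st) (seen, order)).2 := by
  intro rs
  induction rs with
  | nil => intro y cur seen order hr; exact hr
  | cons r rs ihr =>
    intro y cur seen order hr
    simp only [List.foldl_cons]
    by_cases hk : keep.contains r = true
    · rw [dif_pos hk, pvLA cd keep (pvU (PySem.Set.ofList keep) y) y (le_refl _)]
      have hstep : pvVseq cd (PySem.Set.ofList keep) [r] (y, cur) =
          pvVisitOne cd (PySem.Set.ofList keep) r (y, cur) := rfl
      rw [hstep]
      unfold pvVisitOne
      by_cases hv : y.contains r = true
      · have hseen : PySem.Set.contains seen r = true := by rw [← hr.2.2 r]; exact hv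
        have hcb : (PySem.Set.contains (PySem.Set.ofList keep) r &&
            !(PySem.Set.contains seen r)) = false := by
          rw [hseen]; simp
        rw [if_pos hv, hcb]
        simp only [Bool.false_eq_true, if_neg, not_false_iff]
        exact ihr y cur seen order hr
      · have hvf : y.contains r = false := Bool.eq_false_iff.2 hv
        have hseen : PySem.Set.contains seen r = false := by rw [← hr.2.2 r]; exact hvf
        have hcb : (PySem.Set.contains (PySem.Set.ofList keep) r &&
            !(PySem.Set.contains seen r)) = true := by
          rw [hseen, pv_contains_ofList, hk]; rfl
        rw [if_neg hv, hcb]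
        simp only [if_pos]
        exact ihr _ _ _ _
          (pvPar cd (PySem.Set.ofList keep)
            (pvU (PySem.Set.ofList keep) (y.insert r cur)) (y.insert r cur) (cur + 1)
            (PySem.Set.add seen r) (order ++ [r]) (le_refl _)
            (pvRel_step y cur seen order r hr) (cd.getD r []))
    · have hkr : (PySem.Set.contains (PySem.Set.ofList keep) r &&
          !(PySem.Set.contains seen r)) = false := by
        rw [pv_contains_ofList, Bool.eq_false_iff.2 hk]; rfl
      rw [dif_neg hk, hkr]
      simp only [Bool.false_eq_true, if_neg, not_false_iff]
      exact ihr y cur seen order hr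

-- ===== VERDICT (by name: the statement is the Claim_ definition above) =====
theorem assign_y_spec : Claim_equal_assign_y := by
  intro children roots keep _
  show assign_y children roots keep = assign_y_alt children roots keep
  have h0 : pvRel PySem.Dict.empty 0 PySem.Set.empty [] := by
    refine ⟨rfl, rfl, ?_⟩
    intro k
    rfl
  have h := pvTop (PySem.Dict.mk children) keep roots
    PySem.Dict.empty 0 PySem.Set.empty [] h0
  exact congrArg PySem.Dict.items h.1
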